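-- pv_equiv track=rewrite | github.com/coresapian/RalphOS | extract_gateway_builds.py | infer_build_type
-- ===== SOURCE A (Python) =====
-- def infer_build_type(year: int, make: str, model: str) -> str:
--     """Infer build_type based on year, make, model.
--
--     Rules:
--     - Pre-1980: Classic, Hot Rod, Rat Rod, Restomod (if modified)
--     - 1980-1999: Modern Classic, Restomod
--     - 2000+: Modern, USDM, JDM, Euro (based on origin)
--     - Muscle cars: 1960s-1970s American V8s
--     - Trucks: Work Truck, Tow Rig, Off-Road
--     """
--     make_lower = make.lower() if make else ""
--     model_lower = model.lower() if model else ""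
--
--     # American muscle cars
--     if make_lower in ["ford", "chevrolet", "pontiac", "dodge", "plymouth", "oldsmobile", "buick", "mercury"]:
--         if year < 1965:
--             return "Hot Rod"
--         elif year < 1975:
--             # Check for specific muscle models
--             if any(m in model_lower for m in ["mustang", "camaro", "charger", "challenger", "gto", "firebird", "chevelle", "cuda", "charger"]):
--                 return "Muscle"
--             return "Classic"
--         elif year < 1980:
--             return "Classic"
--         elif year < 2000:
--             return "Modern Classic"
--         else:
--             return "USDM"
--
--     # European brands
--     if make_lower in ["porsche", "bmw", "mercedes-benz", "audi", "volkswagen", "jaguar", "aston martin", "ferrari", "lamborghini", "alfa romeo", "fiat", "lotus"]: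
--         if year < 1980:
--             return "Classic"
--         elif year < 2000:
--             return "Modern Classic"
--         else:
--             return "Euro"
--
--     # Japanese brands
--     if make_lower in ["toyota", "nissan", "honda", "mazda", "subaru", "mitsubishi", "lexus", "infiniti", "acura", "datsun"]:
--         if year < 1980:
--             return "Classic"
--         elif year < 2000:
--             return "JDM"
--         else:
--             return "JDM"
--
--     # Trucks and SUVs
--     if any(truck in model_lower for truck in ["truck", "suv", "suburban", "tahoe", "excursion", "bronco", "blazer", "pickup", "f-150", "f150", "silverado", "sierra", "ram"]):
--         if year < 1980:
--             return "Hot Rod"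
--         elif year < 2000:
--             return "Classic"
--         else:
--             return "Work Truck"
--
--     # Default
--     if year < 1980:
--         return "Classic"
--     elif year < 2000:
--         return "Modern Classic"
--     else:
--         return "USDM"
-- ===== SOURCE B (Python) =====
-- _GROUPS = {}
-- for _m in ["ford", "chevrolet", "pontiac", "dodge", "plymouth", "oldsmobile", "buick", "mercury"]:
--     _GROUPS[_m] = "american"
-- for _m in ["porsche", "bmw", "mercedes-benz", "audi", "volkswagen", "jaguar", "aston martin",
--            "ferrari", "lamborghini", "alfa romeo", "fiat", "lotus"]:
--     _GROUPS[_m] = "euro"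
-- for _m in ["toyota", "nissan", "honda", "mazda", "subaru", "mitsubishi", "lexus", "infiniti",
--            "acura", "datsun"]:
--     _GROUPS[_m] = "japanese"
--
-- _MUSCLE_MODELS = ["mustang", "camaro", "charger", "challenger", "gto", "firebird", "chevelle", "cuda"]
--
-- _TRUCK_MODELS = ["truck", "suv", "suburban", "tahoe", "excursion", "bronco", "blazer", "pickup",
--                  "f-150", "f150", "silverado", "sierra", "ram"]
--
-- # Ordered rule tables: first (upper_bound, label) with year < upper_bound wins;
-- # None means no upper bound.  "MUSCLE?" marks the special 1965-1974 American band.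
-- _RULES = {
--     "american": [(1965, "Hot Rod"), (1975, "MUSCLE?"), (1980, "Classic"),
--                  (2000, "Modern Classic"), (None, "USDM")],
--     "euro":     [(1980, "Classic"), (2000, "Modern Classic"), (None, "Euro")],
--     "japanese": [(1980, "Classic"), (None, "JDM")],
--     "truck":    [(1980, "Hot Rod"), (2000, "Classic"), (None, "Work Truck")],
--     "default":  [(1980, "Classic"), (2000, "Modern Classic"), (None, "USDM")],
-- }
--
--
-- def infer_build_type(year: int, make: str, model: str) -> str:
--     model_lower = model.lower()
--     group = _GROUPS.get(make.lower())
--     if group is None: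
--         if any(t in model_lower for t in _TRUCK_MODELS):
--             group = "truck"
--         else:
--             group = "default"
--     for upper, label in _RULES[group]:
--         if upper is None or year < upper:
--             if label == "MUSCLE?":
--                 return "Muscle" if any(m in model_lower for m in _MUSCLE_MODELS) else "Classic"
--             return label
--     return "USDM"  # unreachable: every table ends with an unbounded rule
-- ===== Notes on version B (the rewrite author's own statement) =====
-- stated objective: simpler
-- what changed: Replaces A's hard-coded if/elif cascade with a data-driven classifier: a make-to-origin-group dict plus per-group ordered (upper_year, label) rule tables scanned for the first matching year band, with the muscle-model membership check as the one special band.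
import Mathlib
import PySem

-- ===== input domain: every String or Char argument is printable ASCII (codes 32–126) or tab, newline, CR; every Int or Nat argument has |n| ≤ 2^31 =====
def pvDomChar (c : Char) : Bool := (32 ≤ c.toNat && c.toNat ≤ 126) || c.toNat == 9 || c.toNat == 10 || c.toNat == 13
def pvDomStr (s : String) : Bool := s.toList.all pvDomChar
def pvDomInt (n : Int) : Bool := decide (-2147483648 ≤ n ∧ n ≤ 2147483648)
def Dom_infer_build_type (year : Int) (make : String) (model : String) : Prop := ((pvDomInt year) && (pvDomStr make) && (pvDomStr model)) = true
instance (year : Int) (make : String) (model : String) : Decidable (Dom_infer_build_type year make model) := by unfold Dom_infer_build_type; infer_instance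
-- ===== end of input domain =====

-- B replaces A's if/elif cascade by a make→origin-group dict plus ordered (upper_year, label) rule tables scanned for the first match (objective: simpler, table-driven).


-- ===== PORT A =====
def infer_build_type (year : Int) (make : String) (model : String) : String :=
  let make_lower := if make == "" then "" else PySem.Str.lower make
  let model_lower := if model == "" then "" else PySem.Str.lower model
  -- American muscle cars
  if (["ford", "chevrolet", "pontiac", "dodge", "plymouth", "oldsmobile", "buick", "mercury"]).contains make_lower then
    if year < 1965 then "Hot Rod"
    else if year < 1975 then
      -- Check for specific muscle models ("charger" listed twice, as in the source)
      if (["mustang", "camaro", "charger", "challenger", "gto", "firebird", "chevelle", "cuda", "charger"]).any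
          (fun m => PySem.Str.isIn m model_lower) then "Muscle"
      else "Classic"
    else if year < 1980 then "Classic"
    else if year < 2000 then "Modern Classic"
    else "USDM"
  -- European brands
  else if (["porsche", "bmw", "mercedes-benz", "audi", "volkswagen", "jaguar", "aston martin", "ferrari", "lamborghini", "alfa romeo", "fiat", "lotus"]).contains make_lower then
    if year < 1980 then "Classic"
    else if year < 2000 then "Modern Classic"
    else "Euro"
  -- Japanese brands
  else if (["toyota", "nissan", "honda", "mazda", "subaru", "mitsubishi", "lexus", "infiniti", "acura", "datsun"]).contains make_lower then
    if year < 1980 then "Classic"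
    else if year < 2000 then "JDM"
    else "JDM"
  -- Trucks and SUVs
  else if (["truck", "suv", "suburban", "tahoe", "excursion", "bronco", "blazer", "pickup", "f-150", "f150", "silverado", "sierra", "ram"]).any
      (fun t => PySem.Str.isIn t model_lower) then
    if year < 1980 then "Hot Rod"
    else if year < 2000 then "Classic"
    else "Work Truck"
  -- Default
  else if year < 1980 then "Classic"
  else if year < 2000 then "Modern Classic"
  else "USDM"

-- ===== PORT B =====
def bGroups : PySem.Dict String String :=
  let d := (["ford", "chevrolet", "pontiac", "dodge", "plymouth", "oldsmobile", "buick", "mercury"]).foldl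
    (fun d m => d.insert m "american") PySem.Dict.empty
  let d := (["porsche", "bmw", "mercedes-benz", "audi", "volkswagen", "jaguar", "aston martin", "ferrari", "lamborghini", "alfa romeo", "fiat", "lotus"]).foldl
    (fun d m => d.insert m "euro") d
  (["toyota", "nissan", "honda", "mazda", "subaru", "mitsubishi", "lexus", "infiniti", "acura", "datsun"]).foldl
    (fun d m => d.insert m "japanese") d

def bMuscleModels : List String :=
  ["mustang", "camaro", "charger", "challenger", "gto", "firebird", "chevelle", "cuda"]

def bTruckModels : List String :=
  ["truck", "suv", "suburban", "tahoe", "excursion", "bronco", "blazer", "pickup", "f-150", "f150", "silverado", "sierra", "ram"]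

def bRules : PySem.Dict String (List (Option Int × String)) :=
  PySem.Dict.ofList
    [("american", [(some 1965, "Hot Rod"), (some 1975, "MUSCLE?"), (some 1980, "Classic"), (some 2000, "Modern Classic"), (none, "USDM")]),
     ("euro",     [(some 1980, "Classic"), (some 2000, "Modern Classic"), (none, "Euro")]),
     ("japanese", [(some 1980, "Classic"), (none, "JDM")]),
     ("truck",    [(some 1980, "Hot Rod"), (some 2000, "Classic"), (none, "Work Truck")]),
     ("default",  [(some 1980, "Classic"), (some 2000, "Modern Classic"), (none, "USDM")])]

def bScan (year : Int) (model_lower : String) : List (Option Int × String) → String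
  | [] => "USDM"   -- unreachable: every table ends with an unbounded rule
  | (upper, label) :: rest =>
    if (match upper with | none => true | some u => decide (year < u)) then
      if label == "MUSCLE?" then
        if bMuscleModels.any (fun m => PySem.Str.isIn m model_lower) then "Muscle" else "Classic"
      else label
    else bScan year model_lower rest

def infer_build_type_alt (year : Int) (make : String) (model : String) : String :=
  let model_lower := PySem.Str.lower model
  let group :=
    match bGroups.get? (PySem.Str.lower make) with
    | some g => g
    | none => if bTruckModels.any (fun t => PySem.Str.isIn t model_lower) then "truck" else "default"
  bScan year model_lower (bRules.getD group [])

-- ===== PRECONDITION & SPEC =====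
def Spec_infer_build_type (year : Int) (make : String) (model : String) (out : String) : Prop := out = infer_build_type_alt year make model
instance (year : Int) (make : String) (model : String) (out : String) : Decidable (Spec_infer_build_type year make model out) := by unfold Spec_infer_build_type; infer_instance

-- ===== CLAIM (what is proved, stated in full; the proofs are below) =====
def Claim_equal_infer_build_type : Prop := ∀ (year : Int) (make : String) (model : String), Dom_infer_build_type year make model → Spec_infer_build_type year make model (infer_build_type year make model)

-- ===== LEMMAS AND PROOFS =====
theorem lower_of_guard (s : String) : (if s == "" then "" else PySem.Str.lower s) = PySem.Str.lower s := by
  cases h : s == "" with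
  | true => have hs : s = "" := by simpa using h
            subst hs; decide
  | false => simp

def amrList : List String := ["ford", "chevrolet", "pontiac", "dodge", "plymouth", "oldsmobile", "buick", "mercury"]
def eurList : List String := ["porsche", "bmw", "mercedes-benz", "audi", "volkswagen", "jaguar", "aston martin", "ferrari", "lamborghini", "alfa romeo", "fiat", "lotus"]
def japList : List String := ["toyota", "nissan", "honda", "mazda", "subaru", "mitsubishi", "lexus", "infiniti", "acura", "datsun"]

theorem groups_am (ml : String) (h : ml ∈ amrList) : bGroups.get? ml = some "american" := by
  fin_cases h <;> decide
theorem groups_eu (ml : String) (h : ml ∈ eurList) : bGroups.get? ml = some "euro" := by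
  fin_cases h <;> decide
theorem groups_jp (ml : String) (h : ml ∈ japList) : bGroups.get? ml = some "japanese" := by
  fin_cases h <;> decide
theorem groups_none (ml : String) (ha : ml ∉ amrList) (he : ml ∉ eurList) (hj : ml ∉ japList) :
    bGroups.get? ml = none := by
  rw [show bGroups = PySem.Dict.mk
    [("ford", "american"), ("chevrolet", "american"), ("pontiac", "american"), ("dodge", "american"),
     ("plymouth", "american"), ("oldsmobile", "american"), ("buick", "american"), ("mercury", "american"),
     ("porsche", "euro"), ("bmw", "euro"), ("mercedes-benz", "euro"), ("audi", "euro"), ("volkswagen", "euro"),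
     ("jaguar", "euro"), ("aston martin", "euro"), ("ferrari", "euro"), ("lamborghini", "euro"),
     ("alfa romeo", "euro"), ("fiat", "euro"), ("lotus", "euro"),
     ("toyota", "japanese"), ("nissan", "japanese"), ("honda", "japanese"), ("mazda", "japanese"),
     ("subaru", "japanese"), ("mitsubishi", "japanese"), ("lexus", "japanese"), ("infiniti", "japanese"),
     ("acura", "japanese"), ("datsun", "japanese")] from by decide]
  simp only [amrList, eurList, japList, List.mem_cons, List.not_mem_nil, or_false] at ha he hj
  push Not at ha he hj
  obtain ⟨a1,a2,a3,a4,a5,a6,a7,a8⟩ := ha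
  obtain ⟨e1,e2,e3,e4,e5,e6,e7,e8,e9,e10,e11,e12⟩ := he
  obtain ⟨j1,j2,j3,j4,j5,j6,j7,j8,j9,j10⟩ := hj
  simp [beq_iff_eq, PySem.Dict.get?,
    Ne.symm a1, Ne.symm a2, Ne.symm a3, Ne.symm a4, Ne.symm a5, Ne.symm a6, Ne.symm a7, Ne.symm a8,
    Ne.symm e1, Ne.symm e2, Ne.symm e3, Ne.symm e4, Ne.symm e5, Ne.symm e6, Ne.symm e7, Ne.symm e8,
    Ne.symm e9, Ne.symm e10, Ne.symm e11, Ne.symm e12,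
    Ne.symm j1, Ne.symm j2, Ne.symm j3, Ne.symm j4, Ne.symm j5, Ne.symm j6, Ne.symm j7, Ne.symm j8,
    Ne.symm j9, Ne.symm j10]

theorem ibt_eq (year : Int) (make model : String) :
    infer_build_type year make model = infer_build_type_alt year make model := by
  unfold infer_build_type infer_build_type_alt
  rw [lower_of_guard make, lower_of_guard model]
  generalize PySem.Str.lower make = ml
  generalize PySem.Str.lower model = mo
  by_cases hA : ml ∈ amrList
  · have hc : amrList.contains ml = true := by simpa using hA
    rw [groups_am ml hA]
    simp only [amrList] at hc
    simp only [hc, if_true]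
    simp [bScan, bMuscleModels,
      show bRules.getD "american" [] = [(some 1965, "Hot Rod"), (some 1975, "MUSCLE?"), (some 1980, "Classic"), (some 2000, "Modern Classic"), (none, "USDM")] from by decide]
    split_ifs <;> simp_all
  · have hc : amrList.contains ml = false := by simpa using hA
    simp only [amrList] at hc
    simp only [hc, Bool.false_eq_true, if_false]
    by_cases hE : ml ∈ eurList
    · have hce : eurList.contains ml = true := by simpa using hE
      rw [groups_eu ml hE]
      simp only [eurList] at hce
      simp only [hce, if_true]
      simp [bScan,
        show bRules.getD "euro" [] = [(some 1980, "Classic"), (some 2000, "Modern Classic"), (none, "Euro")] from by decide]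
    · have hce : eurList.contains ml = false := by simpa using hE
      simp only [eurList] at hce
      simp only [hce, Bool.false_eq_true, if_false]
      by_cases hJ : ml ∈ japList
      · have hcj : japList.contains ml = true := by simpa using hJ
        rw [groups_jp ml hJ]
        simp only [japList] at hcj
        simp only [hcj, if_true]
        simp [bScan,
          show bRules.getD "japanese" [] = [(some 1980, "Classic"), (none, "JDM")] from by decide]
      · have hcj : japList.contains ml = false := by simpa using hJ
        simp only [japList] at hcj
        simp only [hcj, Bool.false_eq_true, if_false]
        rw [groups_none ml hA hE hJ]
        cases ht : bTruckModels.any (fun t => PySem.Str.isIn t mo) with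
        | true =>
          simp only [bTruckModels] at ht
          simp only [ht, if_true]
          simp [bScan,
            show bRules.getD "truck" [] = [(some 1980, "Hot Rod"), (some 2000, "Classic"), (none, "Work Truck")] from by decide]
        | false =>
          simp only [bTruckModels] at ht
          simp only [ht, Bool.false_eq_true, if_false]
          simp [bScan,
            show bRules.getD "default" [] = [(some 1980, "Classic"), (some 2000, "Modern Classic"), (none, "USDM")] from by decide]

-- ===== VERDICT (by name: the statement is the Claim_ definition above) =====
theorem infer_build_type_spec : Claim_equal_infer_build_type := by
  intro year make model _
  unfold Spec_infer_build_type
  exact ibt_eq year make model
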